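-- pv_equiv track=rewrite | github.com/edgarstansfield/Algo2Sem | Lab 4.new/second/second.py | function
-- ===== SOURCE A (Python) =====
-- def function(s):
--     s = ''.join(s.split())
--     prev_char = {}
--     my_l = [[0, 0] for _ in range(len(s))]
--
--     for ind, char in enumerate(s):
--         prev_i = prev_char.get(char, None)
--         if prev_i is not None:
--             my_l[ind][0] = my_l[prev_i][0] + 1
--             my_l[ind][1] = my_l[prev_i][1] + my_l[prev_i][0] * (ind - prev_i) + (ind - prev_i - 1)
--         else:
--             my_l[ind] = [0, 0]
--         prev_char[char] = ind
--
--     total = sum(i[1] for i in my_l)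
--     return total
-- ===== SOURCE B (Python) =====
-- def function(s):
--     s = ''.join(s.split())
--     stats = {}
--     total = 0
--     for i, ch in enumerate(s):
--         cnt, idx_sum = stats.get(ch, (0, 0))
--         total += cnt * (i - 1) - idx_sum
--         stats[ch] = (cnt + 1, idx_sum + i)
--     return total
-- ===== Notes on version B (the rewrite author's own statement) =====
-- stated objective: faster
-- what changed: Replaces A's per-position DP table with last-occurrence backpointers (my_l plus prev_char, summed at the end) by a single running total and a per-character (count, index-sum) aggregate, adding cnt*(i-1)-index_sum at each position.
import Mathlib
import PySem

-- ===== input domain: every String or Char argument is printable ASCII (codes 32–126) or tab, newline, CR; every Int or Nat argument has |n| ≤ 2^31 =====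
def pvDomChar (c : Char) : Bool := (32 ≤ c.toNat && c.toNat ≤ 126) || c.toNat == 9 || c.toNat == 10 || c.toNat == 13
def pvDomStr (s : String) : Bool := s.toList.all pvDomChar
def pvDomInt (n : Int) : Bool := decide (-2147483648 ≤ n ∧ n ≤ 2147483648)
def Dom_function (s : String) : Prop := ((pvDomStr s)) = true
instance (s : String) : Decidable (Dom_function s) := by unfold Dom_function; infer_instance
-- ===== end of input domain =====

-- B replaces A's DP table with last-occurrence backpointers (my_l + prev_char, summed at the
-- end) by a running total with a per-character (count, index-sum) aggregate; measured faster.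

-- shared cleaning step: s = ''.join(s.split())
def pvStrip (s : String) : List Char := (PySem.Str.join "" (PySem.Str.split₀ s)).toList

-- ===== PORT A =====
-- one loop iteration of A over (ind, char); state = (prev_char, my_l)
def pvStepA (st : PySem.Dict Char Int × List (Int × Int)) (ic : Int × Char) :
    PySem.Dict Char Int × List (Int × Int) :=
  let ind := ic.1
  let char := ic.2
  let prev := st.1
  let myl := st.2
  let myl' :=
    match prev.get? char with
    | some p =>
      let pe := PySem.List.pyGetD myl p (0, 0)
      PySem.List.pySetD myl ind (pe.1 + 1, pe.2 + pe.1 * (ind - p) + (ind - p - 1))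
    | none => PySem.List.pySetD myl ind (0, 0)
  (prev.insert char ind, myl')

def function (s : String) : Int :=
  let t := pvStrip s
  let myl0 : List (Int × Int) := (List.range t.length).map (fun _ => (0, 0))
  let res := (PySem.List.enumerate t).foldl pvStepA (PySem.Dict.empty, myl0)
  (res.2.map (fun e => e.2)).sum

-- ===== PORT B =====
-- one loop iteration of B over (i, ch); state = (stats, total)
def pvStepB (st : PySem.Dict Char (Int × Int) × Int) (ic : Int × Char) :
    PySem.Dict Char (Int × Int) × Int :=
  let i := ic.1
  let ch := ic.2
  let stats := st.1
  let total := st.2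
  let cnt := (stats.getD ch (0, 0)).1
  let idxSum := (stats.getD ch (0, 0)).2
  (stats.insert ch (cnt + 1, idxSum + i), total + cnt * (i - 1) - idxSum)

def function_alt (s : String) : Int :=
  let t := pvStrip s
  ((PySem.List.enumerate t).foldl pvStepB (PySem.Dict.empty, 0)).2

-- ===== PRECONDITION & SPEC =====
def Spec_function (s : String) (out : Int) : Prop := out = function_alt s
instance (s : String) (out : Int) : Decidable (Spec_function s out) := by unfold Spec_function; infer_instance

-- ===== CLAIM (what is proved, stated in full; the proofs are below) =====
def Claim_equal_function : Prop := ∀ (s : String), Dom_function s → Spec_function s (function s)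

-- ===== LEMMAS AND PROOFS =====

-- sum of the second components after an in-range set
lemma pv_sum2_set (myl : List (Int × Int)) : ∀ (j : Nat), j < myl.length → ∀ (v : Int × Int),
    ((myl.set j v).map (fun e => e.2)).sum
      = (myl.map (fun e => e.2)).sum - (myl.getD j (0, 0)).2 + v.2 := by
  induction myl with
  | nil => intro j hj; simp at hj
  | cons a tl ih =>
    intro j hj v
    cases j with
    | zero => simp [List.getD]; ring
    | succ j =>
      simp only [List.set, List.map, List.sum_cons, List.getD_cons_succ]
      rw [ih j (by simpa using hj) v]; ring

lemma pv_getD_set_self (l : List (Int × Int)) (j : Nat) (hj : j < l.length) (v : Int × Int) :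
    (l.set j v).getD j (0, 0) = v := by
  simp [List.getD, hj]

lemma pv_getD_set_ne (l : List (Int × Int)) (j m : Nat) (h : m ≠ j) (v : Int × Int) :
    (l.set j v).getD m (0, 0) = l.getD m (0, 0) := by
  simp [List.getD, Ne.symm h]

-- the coupled loop invariant: running A's loop and B's loop over the same suffix from index k,
-- with states tied per character (last index ↔ (count, index-sum), table sum ↔ running total),
-- A's final table sum equals B's final total
lemma pv_loop (r : List Char) : ∀ (k : Nat) (prev : PySem.Dict Char Int)
    (myl : List (Int × Int)) (stats : PySem.Dict Char (Int × Int)) (total : Int),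
    myl.length = k + r.length →
    (∀ c, prev.get? c = none → stats.get? c = none) →
    (∀ c p, prev.get? c = some p → ∃ (pn : Nat) (cnt isum : Int), p = (pn : Int) ∧ pn < k ∧
        stats.get? c = some (cnt, isum) ∧
        myl.getD pn (0, 0) = (cnt - 1, (cnt - 1) * ((pn : Int) - 1) - (isum - (pn : Int)))) →
    (∀ j : Nat, k ≤ j → myl.getD j (0, 0) = (0, 0)) →
    total = (myl.map (fun e => e.2)).sum →
    ((((PySem.List.enumerate r (k : Int)).foldl pvStepA (prev, myl)).2.map (fun e => e.2)).sum
      = ((PySem.List.enumerate r (k : Int)).foldl pvStepB (stats, total)).2) := by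
  induction r with
  | nil =>
    intro k prev myl stats total hlen h1 h2 h3 h4
    simp [PySem.List.enumerate_nil]
    exact h4.symm
  | cons x rt ih =>
    intro k prev myl stats total hlen h1 h2 h3 h4
    have hklen : k < myl.length := by simp at hlen; omega
    rw [PySem.List.enumerate_cons, List.foldl_cons, List.foldl_cons]
    have hk1 : (k : Int) + 1 = ((k + 1 : Nat) : Int) := by push_cast; ring
    cases hpx : prev.get? x with
    | none =>
      have hsx : stats.get? x = none := h1 x hpx
      have hA : pvStepA (prev, myl) ((k : Int), x)
          = (prev.insert x (k : Int), myl.set k ((0 : Int), (0 : Int))) := by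
        simp [pvStepA, hpx]
      have hB : pvStepB (stats, total) ((k : Int), x)
          = (stats.insert x ((1 : Int), (k : Int)), total) := by
        simp [pvStepB, PySem.Dict.getD_eq_get?_getD, hsx]
      rw [hA, hB, hk1]
      apply ih (k + 1)
      · simp at hlen ⊢; omega
      · intro c hc
        by_cases hcx : c = x
        · subst hcx; rw [PySem.Dict.get?_insert_self] at hc; exact absurd hc (by simp)
        · rw [PySem.Dict.get?_insert_of_ne _ _ hcx] at hc
          rw [PySem.Dict.get?_insert_of_ne _ _ hcx]
          exact h1 c hc
      · intro c p hc
        by_cases hcx : c = x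
        · subst hcx
          rw [PySem.Dict.get?_insert_self] at hc
          refine ⟨k, 1, (k : Int), by simpa using hc.symm, by omega, by rw [PySem.Dict.get?_insert_self], ?_⟩
          rw [pv_getD_set_self _ _ hklen]
          simp only [Prod.mk.injEq]; exact ⟨by ring, by ring⟩
        · rw [PySem.Dict.get?_insert_of_ne _ _ hcx] at hc
          obtain ⟨pn, cnt, isum, hp, hpk, hs, hm⟩ := h2 c p hc
          refine ⟨pn, cnt, isum, hp, by omega, ?_, ?_⟩
          · rw [PySem.Dict.get?_insert_of_ne _ _ hcx]; exact hs
          · rw [pv_getD_set_ne _ _ _ (by omega)]; exact hm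
      · intro j hj
        rw [pv_getD_set_ne _ _ _ (by omega)]
        exact h3 j (by omega)
      · rw [pv_sum2_set _ _ hklen, h3 k le_rfl, h4]
        ring
    | some p =>
      obtain ⟨pn, cnt, isum, hp, hpk, hsx, hm⟩ := h2 x p hpx
      have hA : pvStepA (prev, myl) ((k : Int), x)
          = (prev.insert x (k : Int), myl.set k (cnt, cnt * ((k : Int) - 1) - isum)) := by
        simp only [pvStepA, hpx]
        subst hp
        simp only [PySem.List.pyGetD_natCast, PySem.List.pySetD_natCast, hm]
        refine congrArg _ (congrArg _ ?_)
        simp only [Prod.mk.injEq]; exact ⟨by ring, by ring⟩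
      have hB : pvStepB (stats, total) ((k : Int), x)
          = (stats.insert x (cnt + 1, isum + (k : Int)), total + cnt * ((k : Int) - 1) - isum) := by
        simp [pvStepB, PySem.Dict.getD_eq_get?_getD, hsx]
      rw [hA, hB, hk1]
      apply ih (k + 1)
      · simp at hlen ⊢; omega
      · intro c hc
        by_cases hcx : c = x
        · subst hcx; rw [PySem.Dict.get?_insert_self] at hc; exact absurd hc (by simp)
        · rw [PySem.Dict.get?_insert_of_ne _ _ hcx] at hc
          rw [PySem.Dict.get?_insert_of_ne _ _ hcx]
          exact h1 c hc
      · intro c q hc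
        by_cases hcx : c = x
        · subst hcx
          rw [PySem.Dict.get?_insert_self] at hc
          refine ⟨k, cnt + 1, isum + (k : Int), by simpa using hc.symm, by omega,
            by rw [PySem.Dict.get?_insert_self], ?_⟩
          rw [pv_getD_set_self _ _ hklen]
          simp only [Prod.mk.injEq]; exact ⟨by ring, by ring⟩
        · rw [PySem.Dict.get?_insert_of_ne _ _ hcx] at hc
          obtain ⟨qn, cnt', isum', hq, hqk, hs, hm'⟩ := h2 c q hc
          refine ⟨qn, cnt', isum', hq, by omega, ?_, ?_⟩
          · rw [PySem.Dict.get?_insert_of_ne _ _ hcx]; exact hs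
          · rw [pv_getD_set_ne _ _ _ (by omega)]; exact hm'
      · intro j hj
        rw [pv_getD_set_ne _ _ _ (by omega)]
        exact h3 j (by omega)
      · rw [pv_sum2_set _ _ hklen, h3 k le_rfl, h4]
        ring

-- ===== VERDICT (by name: the statement is the Claim_ definition above) =====
theorem function_spec : Claim_equal_function := by
  intro s _
  unfold Spec_function function function_alt
  have h := pv_loop (pvStrip s) 0 PySem.Dict.empty
      ((List.range (pvStrip s).length).map (fun _ => ((0 : Int), (0 : Int)))) PySem.Dict.empty 0
      (by simp)
      (by intro c _; simp [PySem.Dict.get?_empty])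
      (by intro c p hc; simp [PySem.Dict.get?_empty] at hc)
      (by intro j _; rcases hh : (List.range (pvStrip s).length)[j]? <;>
            simp [List.getD])
      (by simp)
  simpa using h
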